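-- pv_equiv track=rewrite | github.com/mohamadsolkhannawawi/informatics-practicum-portfolio | Semester-4/Advanced-Programming/GabungKata.py | gabung_kata
-- ===== SOURCE A (Python) =====
-- def gabung_kata(s, t):
--     n = len(s)
--     m = len(t)
--     overlap = 0
--     for i in range(1, min(n, m) + 1):
--         if s[-i:] == t[:i]:
--             overlap = i
--     stringBeda = t[overlap:]
--     hasil = s + stringBeda
--     return len(hasil)
-- ===== SOURCE B (Python) =====
-- def gabung_kata(s, t):
--     m = len(t)
--     if m == 0:
--         return len(s)
--     # KMP prefix function of t
--     pi = [0] * m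
--     k = 0
--     for i in range(1, m):
--         while k and t[i] != t[k]:
--             k = pi[k - 1]
--         if t[i] == t[k]:
--             k += 1
--         pi[i] = k
--     # run the KMP automaton for pattern t over text s; final state = overlap
--     k = 0
--     for c in s:
--         if k == m:
--             k = pi[m - 1]
--         while k and c != t[k]:
--             k = pi[k - 1]
--         if c == t[k]:
--             k += 1
--     return len(s) + m - k
-- ===== Notes on version B (the rewrite author's own statement) =====
-- stated objective: faster
-- what changed: B replaces A's quadratic scan (testing every overlap length with a fresh slice comparison) by the KMP prefix function of t plus a run of the KMP automaton over s, whose final state is the overlap length.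
import Mathlib
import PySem

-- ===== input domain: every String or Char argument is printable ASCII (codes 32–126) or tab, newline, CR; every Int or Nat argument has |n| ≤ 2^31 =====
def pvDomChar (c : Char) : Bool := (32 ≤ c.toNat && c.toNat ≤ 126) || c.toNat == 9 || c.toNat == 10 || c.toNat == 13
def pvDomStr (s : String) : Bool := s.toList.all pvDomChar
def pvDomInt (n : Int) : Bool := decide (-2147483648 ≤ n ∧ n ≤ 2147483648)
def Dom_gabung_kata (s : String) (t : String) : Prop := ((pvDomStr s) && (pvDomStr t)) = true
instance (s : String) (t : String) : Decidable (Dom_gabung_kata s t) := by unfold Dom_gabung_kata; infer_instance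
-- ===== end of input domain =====

-- B replaces A's quadratic all-overlaps scan by the KMP prefix function of t plus one run of the
-- KMP automaton over s (final state = overlap length); measured faster on large inputs.

-- ===== PORT A =====
-- literal port of A: overlap = last i in 1..min(n,m) with s[-i:] == t[:i], result = len(s + t[overlap:])
def gabung_kata (s : String) (t : String) : Int :=
  let cs := s.toList
  let ct := t.toList
  let n : Int := PySem.List.len cs
  let m : Int := PySem.List.len ct
  let overlap : Int :=
    (PySem.List.pyRange 1 (min n m + 1) 1).foldl
      (fun ov i =>
        if PySem.List.slice cs (some (-i)) none = PySem.List.slice ct none (some i) then i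
        else ov) 0
  let stringBeda := PySem.List.slice ct (some overlap) none
  let hasil := cs ++ stringBeda
  PySem.List.len hasil

-- ===== PORT B =====
-- the inner `while k and c != t[k]: k = pi[k-1]`; the fuel argument (k itself) only guards
-- totality: in every run pi[j] ≤ j, so k strictly decreases and the fuel is never exhausted
def kmpWhile (ct : List Char) (pi : List Nat) (c : Char) : Nat → Nat → Nat
  | 0, k => k
  | fuel + 1, k =>
      if k ≠ 0 ∧ c ≠ ct.getD k ' ' then kmpWhile ct pi c fuel (pi.getD (k - 1) 0) else k

-- one iteration of `for i in range(1, m):` building the prefix function (state = (pi, k))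
def piStep (ct : List Char) (st : List Nat × Nat) (i : Nat) : List Nat × Nat :=
  let k := kmpWhile ct st.1 (ct.getD i ' ') st.2 st.2
  let k := if ct.getD i ' ' = ct.getD k ' ' then k + 1 else k
  (st.1.set i k, k)

-- pi = [0]*m; k = 0; for i in range(1, m): ...
def buildPi (ct : List Char) : List Nat :=
  ((List.range' 1 (ct.length - 1)).foldl (piStep ct) (List.replicate ct.length 0, 0)).1

-- one iteration of `for c in s:` of the automaton run
def autoStep (ct : List Char) (pi : List Nat) (m : Nat) (k : Nat) (c : Char) : Nat :=
  let k := if k = m then pi.getD (m - 1) 0 else k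
  let k := kmpWhile ct pi c k k
  if c = ct.getD k ' ' then k + 1 else k

def gabung_kata_alt (s : String) (t : String) : Int :=
  let cs := s.toList
  let ct := t.toList
  let m := ct.length
  if m = 0 then (cs.length : Int)
  else
    let pi := buildPi ct
    let k := cs.foldl (autoStep ct pi m) 0
    (cs.length : Int) + (m : Int) - (k : Int)

-- ===== PRECONDITION & SPEC =====
def Spec_gabung_kata (s : String) (t : String) (out : Int) : Prop := out = gabung_kata_alt s t
instance (s : String) (t : String) (out : Int) : Decidable (Spec_gabung_kata s t out) := by unfold Spec_gabung_kata; infer_instance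

-- ===== CLAIM (what is proved, stated in full; the proofs are below) =====
def Claim_equal_gabung_kata : Prop := ∀ (s : String) (t : String), Dom_gabung_kata s t → Spec_gabung_kata s t (gabung_kata s t)

-- ===== LEMMAS AND PROOFS =====

-- a suffix of a suffix: the shorter of two suffixes of z is a suffix of the longer
lemma sufDown {x y z : List Char} (hx : x <:+ z) (hy : y <:+ z) (h : x.length ≤ y.length) :
    x <:+ y := by
  rw [← List.reverse_prefix] at hx hy ⊢
  exact List.prefix_of_prefix_length_le hx hy (by simpa using h)

lemma concat_suffix_iff {x u : List Char} {a c : Char} :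
    x ++ [a] <:+ u ++ [c] ↔ x <:+ u ∧ a = c := by
  rw [← List.reverse_prefix, List.reverse_append, List.reverse_append]
  simp [List.cons_prefix_cons, List.reverse_prefix, and_comm]

lemma suffix_eq_drop {x u : List Char} (h : x <:+ u) : x = u.drop (u.length - x.length) := by
  obtain ⟨p, rfl⟩ := h; simp

lemma take_succ_getD (ct : List Char) (j : Nat) (h : j < ct.length) :
    ct.take (j + 1) = ct.take j ++ [ct.getD j ' '] := by
  rw [List.take_add_one, List.getElem?_eq_getElem h, List.getD_eq_getElem ct ' ' h]
  rfl

-- the longest proper border of ct.take k (value of the prefix function at k-1)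
def piSpec (ct : List Char) (k : Nat) : Nat :=
  Nat.findGreatest (fun j => ct.take j <:+ ct.take k) (k - 1)

-- the longest prefix of ct that is a suffix of u, capped at min |u| |ct| (the automaton state)
def ovSpec (ct u : List Char) : Nat :=
  Nat.findGreatest (fun j => ct.take j <:+ u) (min u.length ct.length)

lemma piSpec_le (ct : List Char) (k : Nat) : piSpec ct k ≤ k - 1 :=
  Nat.findGreatest_le _

lemma piSpec_border (ct : List Char) (k : Nat) : ct.take (piSpec ct k) <:+ ct.take k := by
  unfold piSpec
  exact Nat.findGreatest_spec (P := fun j => ct.take j <:+ ct.take k) (Nat.zero_le _) (by simp)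

lemma piSpec_max (ct : List Char) {k j : Nat} (hj : j ≤ k - 1) (h : ct.take j <:+ ct.take k) :
    j ≤ piSpec ct k :=
  Nat.le_findGreatest hj h

-- descending-chain characterisation: the borders of ct.take k strictly below k are exactly
-- the borders of ct.take (piSpec ct k) (including piSpec ct k itself)
lemma border_below (ct : List Char) {k j : Nat} (hj : j < k) :
    ct.take j <:+ ct.take k ↔ j ≤ piSpec ct k ∧ ct.take j <:+ ct.take (piSpec ct k) := by
  constructor
  · intro h
    have hjp : j ≤ piSpec ct k := piSpec_max ct (by omega) h
    refine ⟨hjp, sufDown h (piSpec_border ct k) ?_⟩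
    simp only [List.length_take]
    omega
  · rintro ⟨-, h⟩
    exact h.trans (piSpec_border ct k)

-- the while loop, started at a state k whose pi entries are correct, returns the largest
-- border j of ct.take k (j ≤ k) with j = 0 or ct[j] = c
lemma kmpWhile_eq (ct : List Char) (pi : List Nat) (c : Char) :
    ∀ (fuel k : Nat), k ≤ fuel →
      (∀ j, j < k → pi.getD j 0 = piSpec ct (j + 1)) →
      kmpWhile ct pi c fuel k =
        Nat.findGreatest (fun j => ct.take j <:+ ct.take k ∧ (j = 0 ∨ ct.getD j ' ' = c)) k := by
  intro fuel
  induction fuel with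
  | zero =>
      intro k hk _
      interval_cases k
      simp [kmpWhile]
  | succ f ih =>
      intro k hk Hpi
      by_cases hk0 : k = 0
      · subst hk0; simp [kmpWhile]
      have heq : kmpWhile ct pi c (f + 1) k =
          if k ≠ 0 ∧ c ≠ ct.getD k ' ' then kmpWhile ct pi c f (pi.getD (k - 1) 0) else k := rfl
      by_cases hc : c = ct.getD k ' '
      · rw [heq, if_neg (by tauto)]
        exact (Nat.findGreatest_eq ⟨List.suffix_refl _, Or.inr hc.symm⟩).symm
      · have hstep : kmpWhile ct pi c (f + 1) k = kmpWhile ct pi c f (pi.getD (k - 1) 0) := by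
          rw [heq, if_pos ⟨hk0, hc⟩]
        have hent : pi.getD (k - 1) 0 = piSpec ct k := by
          have := Hpi (k - 1) (by omega)
          rwa [show k - 1 + 1 = k by omega] at this
        set p := piSpec ct k with hp
        have hpk : p ≤ k - 1 := piSpec_le ct k
        rw [hstep, hent,
          ih p (by omega) (fun j hj => Hpi j (by omega))]
        -- findGreatest over p equals findGreatest over k, since k itself is not a candidate
        apply Nat.le_antisymm
        · -- values found below p are candidates below k
          have hPr := Nat.findGreatest_spec (P := fun j => ct.take j <:+ ct.take p ∧ (j = 0 ∨ ct.getD j ' ' = c))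
            (Nat.zero_le p) ⟨by simp, Or.inl rfl⟩
          set r := Nat.findGreatest (fun j => ct.take j <:+ ct.take p ∧ (j = 0 ∨ ct.getD j ' ' = c)) p with hr
          have hrle : r ≤ p := Nat.findGreatest_le _
          refine Nat.le_findGreatest (by omega) ?_
          exact ⟨(border_below ct (by omega)).mpr ⟨hrle, hPr.1⟩, hPr.2⟩
        · have hPR := Nat.findGreatest_spec (P := fun j => ct.take j <:+ ct.take k ∧ (j = 0 ∨ ct.getD j ' ' = c))
            (Nat.zero_le k) ⟨by simp, Or.inl rfl⟩
          set R := Nat.findGreatest (fun j => ct.take j <:+ ct.take k ∧ (j = 0 ∨ ct.getD j ' ' = c)) k with hR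
          have hRle : R ≤ k := Nat.findGreatest_le _
          have hRk : R ≠ k := by
            intro h
            rcases hPR.2 with h0 | hm
            · omega
            · rw [h] at hm; exact hc hm.symm
          have := (border_below ct (show R < k by omega)).mp hPR.1
          exact Nat.le_findGreatest this.1 ⟨this.2, hPR.2⟩

-- core step: from the dominant border k₁ of w (below |ct|), the while-then-extend step
-- computes the longest prefix of ct that is a suffix of w ++ [c], capped at K'
lemma step_core (ct w : List Char) (c : Char) (k₁ K' : Nat)
    (hk₁m : k₁ < ct.length) (hb : ct.take k₁ <:+ w)
    (hmax : ∀ j, ct.take j <:+ w → j < ct.length → j + 1 ≤ K' → j ≤ k₁)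
    (hlow : k₁ + 1 ≤ K') (hhigh : K' ≤ ct.length) :
    (if c = ct.getD (Nat.findGreatest (fun j => ct.take j <:+ ct.take k₁ ∧ (j = 0 ∨ ct.getD j ' ' = c)) k₁) ' '
     then Nat.findGreatest (fun j => ct.take j <:+ ct.take k₁ ∧ (j = 0 ∨ ct.getD j ' ' = c)) k₁ + 1
     else Nat.findGreatest (fun j => ct.take j <:+ ct.take k₁ ∧ (j = 0 ∨ ct.getD j ' ' = c)) k₁)
      = Nat.findGreatest (fun j => ct.take j <:+ w ++ [c]) K' := by
  have hP2 := Nat.findGreatest_spec (P := fun j => ct.take j <:+ ct.take k₁ ∧ (j = 0 ∨ ct.getD j ' ' = c))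
    (Nat.zero_le k₁) ⟨by simp, Or.inl rfl⟩
  set k₂ := Nat.findGreatest (fun j => ct.take j <:+ ct.take k₁ ∧ (j = 0 ∨ ct.getD j ' ' = c)) k₁ with hk₂def
  have hk₂ : k₂ ≤ k₁ := Nat.findGreatest_le _
  have hk₂w : ct.take k₂ <:+ w := hP2.1.trans hb
  -- decomposition of a nonempty candidate on the right-hand side
  have hdec : ∀ jj, jj + 1 ≤ K' → ct.take (jj + 1) <:+ w ++ [c] →
      ct.take jj <:+ w ∧ ct.getD jj ' ' = c ∧ jj ≤ k₁ := by
    intro jj hK hsuf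
    have hjl : jj < ct.length := by omega
    rw [take_succ_getD ct jj hjl] at hsuf
    obtain ⟨h1, h2⟩ := concat_suffix_iff.mp hsuf
    exact ⟨h1, h2, hmax jj h1 hjl hK⟩
  by_cases hc : c = ct.getD k₂ ' '
  · rw [if_pos hc]
    have hcand : ct.take (k₂ + 1) <:+ w ++ [c] := by
      rw [take_succ_getD ct k₂ (by omega), ← hc]
      exact concat_suffix_iff.mpr ⟨hk₂w, rfl⟩
    apply Nat.le_antisymm
    · exact Nat.le_findGreatest (by omega) hcand
    · have hPR := Nat.findGreatest_spec (P := fun j => ct.take j <:+ w ++ [c])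
        (Nat.zero_le K') (by simp)
      set R := Nat.findGreatest (fun j => ct.take j <:+ w ++ [c]) K' with hRdef
      have hR1 : k₂ + 1 ≤ R := Nat.le_findGreatest (by omega) hcand
      obtain ⟨jj, hjj⟩ : ∃ jj, R = jj + 1 := ⟨R - 1, by omega⟩
      have hRle' : R ≤ K' := Nat.findGreatest_le _
      rw [hjj] at hPR hR1 hRle' ⊢
      have hRle : jj + 1 ≤ K' := hRle'
      obtain ⟨h1, h2, h3⟩ := hdec jj hRle hPR
      have hjb : ct.take jj <:+ ct.take k₁ := by
        refine sufDown h1 hb ?_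
        simp only [List.length_take]; omega
      have : jj ≤ k₂ := Nat.le_findGreatest h3 ⟨hjb, Or.inr h2⟩
      omega
  · rw [if_neg hc]
    have hk₂0 : k₂ = 0 := by
      rcases hP2.2 with h | h
      · exact h
      · exact absurd h.symm hc
    rw [hk₂0]
    symm
    rw [Nat.findGreatest_eq_zero_iff]
    intro n hn hnK hsuf
    obtain ⟨jj, rfl⟩ : ∃ jj, n = jj + 1 := ⟨n - 1, by omega⟩
    obtain ⟨h1, h2, h3⟩ := hdec jj hnK hsuf
    have hjb : ct.take jj <:+ ct.take k₁ := by
      refine sufDown h1 hb ?_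
      simp only [List.length_take]; omega
    have : jj ≤ k₂ := Nat.le_findGreatest h3 ⟨hjb, Or.inr h2⟩
    have hjj0 : jj = 0 := by omega
    rw [hjj0] at h2
    rw [hk₂0] at hc
    exact hc h2.symm

-- the prefix-function recurrence, in the exact shape of piStep's body
lemma piSpec_succ_eq (ct : List Char) (pi : List Nat) (ii : Nat)
    (h1 : 1 ≤ ii) (h2 : ii < ct.length)
    (Hpi : ∀ j, j < ii → pi.getD j 0 = piSpec ct (j + 1)) :
    (if ct.getD ii ' ' = ct.getD (kmpWhile ct pi (ct.getD ii ' ') (piSpec ct ii) (piSpec ct ii)) ' '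
     then kmpWhile ct pi (ct.getD ii ' ') (piSpec ct ii) (piSpec ct ii) + 1
     else kmpWhile ct pi (ct.getD ii ' ') (piSpec ct ii) (piSpec ct ii)) = piSpec ct (ii + 1) := by
  have hk₀ : piSpec ct ii ≤ ii - 1 := piSpec_le ct ii
  rw [kmpWhile_eq ct pi (ct.getD ii ' ') (piSpec ct ii) (piSpec ct ii) le_rfl
      (fun j hj => Hpi j (by omega))]
  rw [step_core ct (ct.take ii) (ct.getD ii ' ') (piSpec ct ii) ii
      (by omega) (piSpec_border ct ii)
      (fun j hs _ hK => piSpec_max ct (by omega) hs)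
      (by omega) (by omega)]
  unfold piSpec
  rw [take_succ_getD ct ii h2]
  congr 1

-- the automaton step, in the exact shape of autoStep
lemma ovSpec_concat (ct u : List Char) (pi : List Nat) (c : Char) (hm : 0 < ct.length)
    (Hpi : ∀ j, j < ct.length → pi.getD j 0 = piSpec ct (j + 1)) :
    autoStep ct pi ct.length (ovSpec ct u) c = ovSpec ct (u ++ [c]) := by
  have hP := Nat.findGreatest_spec (P := fun j => ct.take j <:+ u)
    (Nat.zero_le (min u.length ct.length)) (by simp)
  set k := ovSpec ct u with hkdef
  have hkle : k ≤ min u.length ct.length := Nat.findGreatest_le _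
  have hmax0 : ∀ j, ct.take j <:+ u → j < ct.length → j ≤ k := by
    intro j hs hj
    refine Nat.le_findGreatest ?_ hs
    have : (ct.take j).length ≤ u.length := hs.length_le
    simp only [List.length_take] at this
    omega
  -- the state after the reset branch
  have hcore : ∀ k₁, k₁ < ct.length → ct.take k₁ <:+ u →
      (∀ j, ct.take j <:+ u → j < ct.length → j + 1 ≤ min (u.length + 1) ct.length → j ≤ k₁) →
      (if c = ct.getD (kmpWhile ct pi c k₁ k₁) ' ' then kmpWhile ct pi c k₁ k₁ + 1
       else kmpWhile ct pi c k₁ k₁) = ovSpec ct (u ++ [c]) := by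
    intro k₁ hlt hb hmx
    have hk₁u : k₁ ≤ u.length := by
      have := hb.length_le
      simp only [List.length_take] at this
      omega
    rw [kmpWhile_eq ct pi c k₁ k₁ le_rfl (fun j hj => Hpi j (by omega))]
    rw [step_core ct u c k₁ (min (u.length + 1) ct.length) hlt hb hmx
        (by omega) (by omega)]
    unfold ovSpec
    congr 1
    simp
  unfold autoStep
  by_cases hkm : k = ct.length
  · rw [if_pos hkm]
    have hent : pi.getD (ct.length - 1) 0 = piSpec ct ct.length := by
      have := Hpi (ct.length - 1) (by omega)
      rwa [show ct.length - 1 + 1 = ct.length by omega] at this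
    have hctu : ct.take ct.length <:+ u := by rw [← hkm]; exact hP
    rw [hent]
    refine hcore (piSpec ct ct.length) (by have := piSpec_le ct ct.length; omega)
      ((piSpec_border ct ct.length).trans hctu) ?_
    intro j hs hj hK
    refine piSpec_max ct (by omega) (sufDown hs hctu ?_)
    simp only [List.length_take]; omega
  · rw [if_neg hkm]
    exact hcore k (by omega) hP (fun j hs hj _ => hmax0 j hs hj)

-- invariant of the prefix-function-building fold
lemma buildPi_inv (ct : List Char) :
    ∀ i, i ≤ ct.length - 1 →
      ((List.range' 1 i).foldl (piStep ct) (List.replicate ct.length 0, 0)).1.length = ct.length ∧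
      (∀ j, j ≤ i →
        ((List.range' 1 i).foldl (piStep ct) (List.replicate ct.length 0, 0)).1.getD j 0 = piSpec ct (j + 1)) ∧
      ((List.range' 1 i).foldl (piStep ct) (List.replicate ct.length 0, 0)).2 = piSpec ct (i + 1) := by
  intro i
  induction i with
  | zero =>
      intro _
      refine ⟨by simp, ?_, ?_⟩
      · intro j hj
        interval_cases j
        simp [piSpec]
      · simp [piSpec]
  | succ i ih =>
      intro hi
      obtain ⟨hlen, hent, hk⟩ := ih (by omega)
      rw [List.range'_1_concat, List.foldl_append]
      set st := (List.range' 1 i).foldl (piStep ct) (List.replicate ct.length 0, 0) with hst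
      simp only [List.foldl_cons, List.foldl_nil]
      have hii1 : 1 ≤ 1 + i := by omega
      have hii2 : 1 + i < ct.length := by omega
      have Hpi : ∀ j, j < 1 + i → st.1.getD j 0 = piSpec ct (j + 1) :=
        fun j hj => hent j (by omega)
      have hnew : (if ct.getD (1 + i) ' ' = ct.getD (kmpWhile ct st.1 (ct.getD (1 + i) ' ') st.2 st.2) ' '
          then kmpWhile ct st.1 (ct.getD (1 + i) ' ') st.2 st.2 + 1
          else kmpWhile ct st.1 (ct.getD (1 + i) ' ') st.2 st.2) = piSpec ct (1 + i + 1) := by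
        rw [hk, show i + 1 = 1 + i by omega]
        exact piSpec_succ_eq ct st.1 (1 + i) hii1 hii2 Hpi
      unfold piStep
      refine ⟨by simpa using hlen, ?_, ?_⟩
      · intro j hj
        simp only
        rw [hk] at hnew ⊢
        by_cases hji : j = 1 + i
        · subst hji
          rw [List.getD_eq_getElem?_getD, List.getElem?_set_self (by omega),
            Option.getD_some, hnew]
        · rw [List.getD_eq_getElem?_getD, List.getElem?_set_ne (by omega),
            ← List.getD_eq_getElem?_getD]
          exact hent j (by omega)
      · simp only
        rw [hk] at hnew ⊢
        rw [hnew]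
        congr 1
        omega

lemma buildPi_correct (ct : List Char) :
    ∀ j, j < ct.length → (buildPi ct).getD j 0 = piSpec ct (j + 1) := by
  intro j hj
  unfold buildPi
  exact (buildPi_inv ct (ct.length - 1) le_rfl).2.1 j (by omega)

-- the automaton fold over s computes ovSpec
lemma auto_fold (ct : List Char) (hm : 0 < ct.length) (cs : List Char) :
    cs.foldl (autoStep ct (buildPi ct) ct.length) 0 = ovSpec ct cs := by
  induction cs using List.reverseRecOn with
  | nil => simp [ovSpec]
  | append_singleton u c ih =>
      rw [List.foldl_append, List.foldl_cons, List.foldl_nil, ih]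
      exact ovSpec_concat ct u (buildPi ct) c hm (buildPi_correct ct)

-- ===== A-side characterisation =====

-- A's loop as a fold over range(1, K+1)
def ovFold (cs ct : List Char) (K : Nat) : Int :=
  (PySem.List.pyRange 1 ((K : Int) + 1) 1).foldl
    (fun ov i =>
      if PySem.List.slice cs (some (-i)) none = PySem.List.slice ct none (some i) then i
      else ov) 0

lemma ovFold_succ (cs ct : List Char) (j : Nat) :
    ovFold cs ct (j + 1) =
      if PySem.List.slice cs (some (-((j + 1 : Nat) : Int))) none
          = PySem.List.slice ct none (some ((j + 1 : Nat) : Int)) then ((j + 1 : Nat) : Int)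
      else ovFold cs ct j := by
  unfold ovFold
  rw [PySem.List.pyRange_one_succ_right (show (1 : Int) ≤ ((j + 1 : Nat) : Int) by push_cast; omega),
      List.foldl_append]
  push_cast
  simp

-- A's loop test equals the suffix condition
lemma cond_iff (cs ct : List Char) (j : Nat) (_hn : j + 1 ≤ cs.length) (hm : j + 1 ≤ ct.length) :
    (PySem.List.slice cs (some (-((j + 1 : Nat) : Int))) none
        = PySem.List.slice ct none (some ((j + 1 : Nat) : Int)))
      ↔ ct.take (j + 1) <:+ cs := by
  rw [PySem.List.slice_from_neg_natCast cs (j + 1) (by omega),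
      PySem.List.slice_to_natCast ct (j + 1)]
  constructor
  · intro h
    rw [← h]
    exact List.drop_suffix _ _
  · intro h
    have hthis := suffix_eq_drop h
    rw [List.length_take, show min (j + 1) ct.length = j + 1 by omega] at hthis
    exact hthis.symm

lemma ovFold_eq (cs ct : List Char) :
    ∀ K, K ≤ min cs.length ct.length →
      ovFold cs ct K = ((Nat.findGreatest (fun j => ct.take j <:+ cs) K : Nat) : Int) := by
  intro K
  induction K with
  | zero =>
      intro _
      unfold ovFold
      simp [PySem.List.pyRange_one_eq_nil]
  | succ j ih =>
      intro hK
      rw [ovFold_succ, Nat.findGreatest_succ]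
      by_cases h : ct.take (j + 1) <:+ cs
      · rw [if_pos ((cond_iff cs ct j (by omega) (by omega)).mpr h), if_pos h]
      · rw [if_neg (fun hc => h ((cond_iff cs ct j (by omega) (by omega)).mp hc)),
            if_neg h, ih (by omega)]

-- ===== VERDICT (by name: the statement is the Claim_ definition above) =====
theorem gabung_kata_spec : Claim_equal_gabung_kata := by
  intro s t _
  unfold Spec_gabung_kata
  set cs := s.toList with hcs
  set ct := t.toList with hct
  set OV := Nat.findGreatest (fun j => ct.take j <:+ cs) (min cs.length ct.length) with hOV
  have hOVle : OV ≤ min cs.length ct.length := Nat.findGreatest_le _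
  -- A's value
  have hA : gabung_kata s t = (cs.length : Int) + (ct.length : Int) - (OV : Int) := by
    have h1 : gabung_kata s t =
        PySem.List.len (cs ++ PySem.List.slice ct (some (ovFold cs ct (min cs.length ct.length))) none) := by
      unfold gabung_kata
      simp only [← hcs, ← hct]
      congr 2
      unfold ovFold
      congr 2
      simp [PySem.List.len_eq]
    rw [h1, ovFold_eq cs ct (min cs.length ct.length) le_rfl, ← hOV,
        PySem.List.slice_from ct (by positivity)]
    rw [PySem.List.len_eq]
    push_cast [List.length_append, List.length_drop]
    omega
  rw [hA]
  -- B's value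
  unfold gabung_kata_alt
  simp only [← hcs, ← hct]
  by_cases hm : ct.length = 0
  · rw [if_pos hm]
    have : OV = 0 := by omega
    rw [this, hm]
    push_cast
    omega
  · rw [if_neg hm]
    rw [auto_fold ct (by omega) cs]
    unfold ovSpec
    rw [← hOV]
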